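-- pv_equiv track=rewrite | github.com/JanzenLiu/MercariPrice | code/prep/fill_brand.py | _get_multiword_dict_simple
-- ===== SOURCE A (Python) =====
-- def _get_multiword_dict_simple(s_lst):
--     """
--     Generate auxiliary dictionary to for brand filling with given string list.
--
--     The outcome of this method is the same as _get_multiword_dict(), but this one assumes all string in the list is
--     already multi-word string, so no checking is performed and hence it will be faster.
--
--     :param s_lst: [string]
--     :return: dict
--     """
--     d = {}
--     for s in s_lst:
--         w_list = s.split(" ")  # split string into word sequence/list
--         w = w_list[0].lower()
--         if w in d.keys():
--             d[w].append(s)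
--         else:
--             d[w] = [s]
--     return d
-- ===== SOURCE B (Python) =====
-- def _get_multiword_dict_simple(s_lst):
--     key = lambda s: s.split(" ")[0].lower()
--     keys = list(dict.fromkeys(key(s) for s in s_lst))
--     return {k: [s for s in s_lst if key(s) == k] for k in keys}
-- ===== Notes on version B (the rewrite author's own statement) =====
-- stated objective: alternative
-- what changed: Replaces A's single-pass dict accumulation (append-or-create per element) with a two-phase strategy: first an ordered dedup of the lowercased first words, then a dict comprehension that rescans the list once per key to collect each group.
import Mathlib
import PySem

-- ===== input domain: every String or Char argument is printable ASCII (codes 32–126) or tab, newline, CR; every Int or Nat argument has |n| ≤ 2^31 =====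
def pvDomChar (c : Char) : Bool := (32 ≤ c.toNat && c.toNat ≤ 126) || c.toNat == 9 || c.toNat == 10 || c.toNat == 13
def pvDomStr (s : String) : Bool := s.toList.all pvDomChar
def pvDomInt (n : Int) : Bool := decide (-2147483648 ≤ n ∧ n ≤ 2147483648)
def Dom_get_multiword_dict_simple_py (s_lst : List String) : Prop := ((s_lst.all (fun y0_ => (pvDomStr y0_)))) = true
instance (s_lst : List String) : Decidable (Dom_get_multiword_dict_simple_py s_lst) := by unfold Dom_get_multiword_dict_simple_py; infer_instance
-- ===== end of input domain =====

-- B groups by the same key with a two-phase strategy (ordered dedup of the keys, then one rescan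
-- per key) instead of A's single-pass append-or-create dict accumulation; objective: alternative.

-- s.split(" ")[0].lower() — split? with sep " " is never none, and its result is never empty,
-- so the .getD defaults are unreachable (pyGetD 0 "" stands for w_list[0], exact here).
def pvFirstWordLower (s : String) : String :=
  PySem.Str.lower (PySem.List.pyGetD ((PySem.Str.split? s " ").getD []) 0 "")

-- ===== PORT A =====
def get_multiword_dict_simple_py (s_lst : List String) : List (String × List String) :=
  (s_lst.foldl (fun d s =>
      let w := pvFirstWordLower s
      if d.contains w then d.modify w [] (· ++ [s])   -- d[w].append(s)
      else d.insert w [s]                              -- d[w] = [s]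
    ) PySem.Dict.empty).items

-- ===== PORT B =====
def get_multiword_dict_simple_py_alt (s_lst : List String) : List (String × List String) :=
  (PySem.List.dedup (s_lst.map pvFirstWordLower)).map
    (fun k => (k, s_lst.filter (fun s => pvFirstWordLower s == k)))

-- ===== PRECONDITION & SPEC =====
def Spec_get_multiword_dict_simple_py (s_lst : List String) (out : List (String × List String)) : Prop := out = get_multiword_dict_simple_py_alt s_lst
instance (s_lst : List String) (out : List (String × List String)) : Decidable (Spec_get_multiword_dict_simple_py s_lst out) := by unfold Spec_get_multiword_dict_simple_py; infer_instance

-- ===== CLAIM (what is proved, stated in full; the proofs are below) =====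
def Claim_equal_get_multiword_dict_simple_py : Prop := ∀ (s_lst : List String), Dom_get_multiword_dict_simple_py s_lst → Spec_get_multiword_dict_simple_py s_lst (get_multiword_dict_simple_py s_lst)

-- ===== LEMMAS AND PROOFS =====

-- A's two branches are both 'd[w] = d.get(w, []) + [s]', i.e. one Dict.modify.
theorem pv_step_eq (d : PySem.Dict String (List String)) (s : String) :
    (if d.contains (pvFirstWordLower s) then d.modify (pvFirstWordLower s) [] (· ++ [s])
     else d.insert (pvFirstWordLower s) [s])
      = d.modify (pvFirstWordLower s) [] (· ++ [s]) := by
  split_ifs with h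
  · rfl
  · show d.insert _ [s] = d.insert _ (d.getD _ [] ++ [s])
    rw [PySem.Dict.getD_of_not_contains _ _ (by simpa using h), List.nil_append]

theorem pv_dict_eq (s_lst : List String) :
    s_lst.foldl (fun d s =>
        let w := pvFirstWordLower s
        if d.contains w then d.modify w [] (· ++ [s]) else d.insert w [s]) PySem.Dict.empty
      = s_lst.foldl (fun d s => d.modify (pvFirstWordLower s) [] (· ++ [s])) PySem.Dict.empty :=
  PySem.List.foldl_congr_mem _ _ _ _ (fun d s _ => pv_step_eq d s)

theorem pv_getD_eq (s_lst : List String) (c : String) :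
    (s_lst.foldl (fun d s => d.modify (pvFirstWordLower s) [] (· ++ [s])) PySem.Dict.empty).getD c []
      = s_lst.filter (fun s => pvFirstWordLower s == c) := by
  rw [show (s_lst.foldl (fun d s => d.modify (pvFirstWordLower s) [] (· ++ [s])) PySem.Dict.empty)
        = (s_lst.map (fun s => (pvFirstWordLower s, s))).foldl
            (fun (d : PySem.Dict String (List String)) (p : String × String) => d.modify p.1 [] (· ++ [p.2])) PySem.Dict.empty from
      (List.foldl_map (f := fun s => (pvFirstWordLower s, s)) (g := fun (d : PySem.Dict String (List String)) (p : String × String) => d.modify p.1 [] (· ++ [p.2]))).symm]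
  rw [PySem.Dict.getD_foldl_modify_append]
  simp [List.filter_map, Function.comp_def]

-- ===== VERDICT (by name: the statement is the Claim_ definition above) =====
theorem get_multiword_dict_simple_py_spec : Claim_equal_get_multiword_dict_simple_py := by
  intro s_lst _
  show get_multiword_dict_simple_py s_lst = get_multiword_dict_simple_py_alt s_lst
  unfold get_multiword_dict_simple_py get_multiword_dict_simple_py_alt
  rw [pv_dict_eq]
  have hnd : (s_lst.foldl (fun d s => d.modify (pvFirstWordLower s) [] (· ++ [s]))
      PySem.Dict.empty).keys.Nodup :=
    PySem.Dict.nodup_keys_foldl_modify_key s_lst pvFirstWordLower [] (fun _ s => (· ++ [s]))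
      PySem.Dict.empty (by simp)
  rw [PySem.Dict.items_eq_map_keys _ hnd []]
  rw [PySem.Dict.keys_foldl_modify_key]
  simp only [PySem.Dict.keys_empty, PySem.List.dedup_eq_ofList]
  refine List.map_congr_left (fun k _ => ?_)
  rw [pv_getD_eq]
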